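-- pv_equiv track=rewrite | github.com/krisio/programming_0 | week3/Problems-Construction/lyulin_city.py | seen_blocks
-- ===== SOURCE A (Python) =====
-- def seen_blocks(n):
--     seen = 1
--     beg = 0
--     end = len(n)
--     highest = n[0]
--
--     for bl in n:
--         if bl < highest:
--             seen += 1
--             highest = bl
--
--     return seen
-- ===== SOURCE B (Python) =====
-- from itertools import accumulate
--
-- def seen_blocks(n):
--     # distinct values of the running-minimum sequence: one per new strict minimum
--     return len(set(accumulate(n, min)))
-- ===== Notes on version B (the rewrite author's own statement) =====
-- stated objective: idiomatic
-- what changed: Replaces the explicit counter-and-highest loop with accumulate(n, min) followed by counting the distinct running-minimum values.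
import Mathlib
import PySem

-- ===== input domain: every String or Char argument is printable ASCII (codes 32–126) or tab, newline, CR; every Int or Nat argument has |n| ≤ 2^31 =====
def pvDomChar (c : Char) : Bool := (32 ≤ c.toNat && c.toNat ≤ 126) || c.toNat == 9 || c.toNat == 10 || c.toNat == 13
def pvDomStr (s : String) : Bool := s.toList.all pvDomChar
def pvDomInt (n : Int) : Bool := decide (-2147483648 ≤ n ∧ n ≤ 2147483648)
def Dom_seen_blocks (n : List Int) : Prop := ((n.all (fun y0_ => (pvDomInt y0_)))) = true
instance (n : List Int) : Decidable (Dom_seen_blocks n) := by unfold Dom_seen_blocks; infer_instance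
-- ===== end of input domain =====

-- B replaces A's counter-and-highest loop by counting the distinct values of the
-- running-minimum sequence (idiomatic accumulate/set decomposition); same cost.

-- ===== PORT A =====
-- A reads the first element (IndexError on the empty list); here pyGetD with a dummy default, guarded by Pre_
def seen_blocks (n : List Int) : Int :=
  let highest := PySem.List.pyGetD n 0 0
  let st := n.foldl (fun (p : Int × Int) bl =>
    if bl < p.2 then (p.1 + 1, bl) else p) (1, highest)
  st.1

-- ===== PORT B =====
-- list(accumulate(xs, min)) continued from a running value acc
def accumMinFrom (acc : Int) : List Int → List Int
  | [] => []
  | y :: ys => min acc y :: accumMinFrom (min acc y) ys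

-- list(accumulate(n, min))
def accumMin : List Int → List Int
  | [] => []
  | x :: xs => x :: accumMinFrom x xs

def seen_blocks_alt (n : List Int) : Int :=
  PySem.Set.len (PySem.Set.ofList (accumMin n))

-- ===== PRECONDITION & SPEC =====
-- A indexes the first element directly: the empty list raises IndexError, so it is excluded
def Pre_seen_blocks (n : List Int) : Prop := n ≠ []
instance (n : List Int) : Decidable (Pre_seen_blocks n) := by unfold Pre_seen_blocks; infer_instance
def pvWitness_seen_blocks : List Int := [3, 1, 2, 0]

def Spec_seen_blocks (n : List Int) (out : Int) : Prop := out = seen_blocks_alt n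
instance (n : List Int) (out : Int) : Decidable (Spec_seen_blocks n out) := by unfold Spec_seen_blocks; infer_instance

-- ===== CLAIM (what is proved, stated in full; the proofs are below) =====
def Claim_equal_seen_blocks : Prop := ∀ (n : List Int), Dom_seen_blocks n → Pre_seen_blocks n → Spec_seen_blocks n (seen_blocks n)

-- ===== LEMMAS AND PROOFS =====

-- number of strict drops of the running minimum starting at h
def cnt (h : Int) : List Int → Int
  | [] => 0
  | y :: ys => if y < h then 1 + cnt y ys else cnt h ys

theorem foldlA_fst (xs : List Int) (s h : Int) :
    (xs.foldl (fun (p : Int × Int) bl =>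
      if bl < p.2 then (p.1 + 1, bl) else p) (s, h)).1 = s + cnt h xs := by
  induction xs generalizing s h with
  | nil => simp [cnt]
  | cons y ys ih =>
    simp only [List.foldl_cons, cnt]
    by_cases hy : y < h
    · simp [hy, ih]; ring
    · simp [hy, ih]

theorem setlen_accumMinFrom (xs : List Int) (acc : Int) (s : PySem.Set Int)
    (hmem : acc ∈ s) (hub : ∀ z ∈ s, acc ≤ z) :
    ((accumMinFrom acc xs).foldl PySem.Set.add s).length = s.length + cnt acc xs := by
  induction xs generalizing acc s with
  | nil => simp [accumMinFrom, cnt]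
  | cons y ys ih =>
    simp only [accumMinFrom, List.foldl_cons, cnt]
    by_cases hy : y < acc
    · have hmin : min acc y = y := by omega
      have hnot : y ∉ s := fun h => absurd (hub y h) (by omega)
      have hadd : PySem.Set.add s y = s ++ [y] := by
        simp [PySem.Set.add, PySem.Set.contains, hnot]
      rw [hmin, hadd, if_pos hy,
        ih y (s ++ [y]) (by simp) (by
          intro z hz
          rcases List.mem_append.mp hz with h | h
          · exact le_of_lt (lt_of_lt_of_le hy (hub z h))
          · simp at h; omega)]
      simp; ring
    · have hmin : min acc y = acc := by omega
      have hadd : PySem.Set.add s acc = s := by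
        simp [PySem.Set.add, PySem.Set.contains, hmem]
      rw [hmin, hadd, if_neg hy, ih acc s hmem hub]

-- ===== VERDICT (by name: the statement is the Claim_ definition above) =====
theorem seen_blocks_spec : Claim_equal_seen_blocks := by
  intro n _ hpre
  unfold Spec_seen_blocks seen_blocks seen_blocks_alt
  match n, hpre with
  | x :: xs, _ =>
    have hA : (PySem.List.pyGetD (x :: xs) 0 0) = x := by
      simp [PySem.List.pyGetD, PySem.List.pyGet?, PySem.List.pyIdx?]
    simp only [hA, List.foldl_cons]
    have h0 : ¬ (x < x) := lt_irrefl x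
    rw [if_neg h0, foldlA_fst]
    have hB : PySem.Set.ofList (accumMin (x :: xs)) =
        (accumMinFrom x xs).foldl PySem.Set.add (PySem.Set.add PySem.Set.empty x) := by
      rw [PySem.Set.ofList_eq_foldl]; rfl
    have hax : PySem.Set.add PySem.Set.empty x = [x] := by
      simp [PySem.Set.add, PySem.Set.contains, PySem.Set.empty]
    rw [PySem.Set.len, hB, hax,
      setlen_accumMinFrom xs x [x] (by simp) (by intro z hz; simp at hz; omega)]
    simp
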